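-- pv_equiv track=rewrite | github.com/Nicolas13100/python | Py/TP1/TP1_1/start.py | calculer_somme_et_produit_pairs
-- ===== SOURCE A (Python) =====
-- def calculer_somme_et_produit_pairs(N):
--     """Calcule la somme et le produit des nombres pairs jusqu'à N."""
--     somme = 0
--     produit = 1
--     nombres_pairs = []
--
--     for i in range(2, N + 1, 2):
--         somme += i
--         produit *= i
--         nombres_pairs.append(i)
--
--     return somme, produit, nombres_pairs
-- ===== SOURCE B (Python) =====
-- def calculer_somme_et_produit_pairs(N):
--     """Calcule la somme et le produit des nombres pairs jusqu'à N."""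
--     k = max(0, N) // 2                       # how many evens in 2..N
--     somme = k * (k + 1)                      # closed form: 2+4+...+2k = k(k+1)
--     factorielle = 1
--     for i in range(2, k + 1):
--         factorielle *= i
--     produit = (1 << k) * factorielle         # 2*4*...*2k = 2^k * k!
--     nombres_pairs = [2 * i for i in range(1, k + 1)]
--     return somme, produit, nombres_pairs
-- ===== Notes on version B (the rewrite author's own statement) =====
-- stated objective: alternative
-- what changed: Replaces A's fused loop over range(2,N+1,2) with arithmetic identities: the count k=max(0,N)//2, the closed form k*(k+1) for the sum, the identity 2^k * k! (factorial loop plus a shift) for the product, and the evens list rebuilt by doubling 1..k.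
import Mathlib
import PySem

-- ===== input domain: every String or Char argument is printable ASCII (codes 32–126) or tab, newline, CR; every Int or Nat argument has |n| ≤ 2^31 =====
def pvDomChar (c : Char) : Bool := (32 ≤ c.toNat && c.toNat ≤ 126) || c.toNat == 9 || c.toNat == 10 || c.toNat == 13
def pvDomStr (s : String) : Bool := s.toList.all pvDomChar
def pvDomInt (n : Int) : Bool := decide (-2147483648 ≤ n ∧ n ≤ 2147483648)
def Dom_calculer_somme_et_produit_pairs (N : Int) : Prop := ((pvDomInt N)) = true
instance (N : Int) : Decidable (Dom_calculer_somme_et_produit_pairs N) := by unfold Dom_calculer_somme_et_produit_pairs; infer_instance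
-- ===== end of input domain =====

-- B replaces A's fused accumulating loop by arithmetic identities: k = max(0,N)//2 evens,
-- sum = k*(k+1) closed form, product = 2^k * k! (factorial loop + shift), list by doubling 1..k.

-- ===== PORT A =====
def calculer_somme_et_produit_pairs (N : Int) : Int × Int × List Int :=
  -- one loop over range(2, N+1, 2) accumulating (somme, produit, nombres_pairs)
  (PySem.List.pyRange 2 (N + 1) 2).foldl
    (fun st i => (st.1 + i, st.2.1 * i, st.2.2 ++ [i]))
    (0, 1, ([] : List Int))

-- ===== PORT B =====
def calculer_somme_et_produit_pairs_alt (N : Int) : Int × Int × List Int :=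
  let k := PySem.Int.floordiv (max 0 N) 2
  let somme := k * (k + 1)
  let factorielle := (PySem.List.pyRange 2 (k + 1) 1).foldl (· * ·) 1
  let produit := 2 ^ k.toNat * factorielle   -- 1 << k; k ≥ 0 here, so toNat is exact
  let nombres_pairs := (PySem.List.pyRange 1 (k + 1) 1).map (fun i => 2 * i)
  (somme, produit, nombres_pairs)

-- ===== PRECONDITION & SPEC =====
def Spec_calculer_somme_et_produit_pairs (N : Int) (out : Int × Int × List Int) : Prop := out = calculer_somme_et_produit_pairs_alt N
instance (N : Int) (out : Int × Int × List Int) : Decidable (Spec_calculer_somme_et_produit_pairs N out) := by unfold Spec_calculer_somme_et_produit_pairs; infer_instance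

-- ===== CLAIM (what is proved, stated in full; the proofs are below) =====
def Claim_equal_calculer_somme_et_produit_pairs : Prop := ∀ (N : Int), Dom_calculer_somme_et_produit_pairs N → Spec_calculer_somme_et_produit_pairs N (calculer_somme_et_produit_pairs N)

-- ===== LEMMAS AND PROOFS =====

-- the evens 2,4,...,2K, as both programs produce them
def pvEvens (K : Nat) : List Int := (List.range K).map (fun (j : Nat) => 2 + 2 * (j : Int))

-- A's fused loop computes (sum, product, list) of its input list.
theorem pv_foldl_triple (l : List Int) (s p : Int) (acc : List Int) :
    l.foldl (fun st i => (st.1 + i, st.2.1 * i, st.2.2 ++ [i])) (s, p, acc)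
      = (l.foldl (· + ·) s, l.foldl (· * ·) p, acc ++ l) := by
  induction l generalizing s p acc with
  | nil => simp
  | cons x xs ih => simp [List.foldl, ih]

theorem pv_sum_evens (K : Nat) :
    (pvEvens K).foldl (· + ·) 0 = (K : Int) * (K + 1) := by
  induction K with
  | zero => simp [pvEvens]
  | succ n ih =>
    unfold pvEvens at *
    rw [List.range_succ, List.map_append, List.foldl_append, ih]
    push_cast; simp; ring

theorem pv_fact_range (K : Nat) :
    (PySem.List.pyRange 2 ((K : Int) + 1) 1).foldl (· * ·) 1 = (Nat.factorial K : Int) := by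
  induction K with
  | zero =>
    rw [PySem.List.pyRange_one_eq_nil (by norm_num)]
    simp [Nat.factorial]
  | succ n ih =>
    have hc : ((n + 1 : Nat) : Int) + 1 = ((n : Int) + 1) + 1 := by push_cast; ring
    rw [hc]
    rcases Nat.eq_zero_or_pos n with h | h
    · subst h
      rw [show ((0 : Nat) : Int) + 1 + 1 = (2 : Int) by norm_num,
          PySem.List.pyRange_one_eq_nil le_rfl]
      simp [Nat.factorial]
    · have h2 : (2 : Int) ≤ (n : Int) + 1 := by exact_mod_cast Nat.succ_le_succ h
      rw [PySem.List.pyRange_one_succ_right h2, List.foldl_append, ih]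
      simp [Nat.factorial_succ]; ring

theorem pv_prod_evens (K : Nat) :
    (pvEvens K).foldl (· * ·) 1 = 2 ^ K * (Nat.factorial K : Int) := by
  induction K with
  | zero => simp [pvEvens, Nat.factorial]
  | succ n ih =>
    unfold pvEvens at *
    rw [List.range_succ, List.map_append, List.foldl_append, ih]
    simp [Nat.factorial_succ]; ring

-- Both programs traverse the same list of evens.
theorem pv_evens_list (N : Int) :
    PySem.List.pyRange 2 (N + 1) 2 = pvEvens ((max 0 N).toNat / 2) := by
  rw [PySem.List.pyRange_of_pos _ _ (by norm_num)]
  unfold pvEvens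
  have hidx : (if (2 : Int) < N + 1 then ((N + 1 - 2 + 2 - 1) / 2).toNat else 0)
      = (max 0 N).toNat / 2 := by
    split_ifs with h
    · have he : N + 1 - 2 + 2 - 1 = N := by ring
      rw [he]; omega
    · omega
  rw [hidx]

theorem pv_floordiv_max (N : Int) :
    PySem.Int.floordiv (max 0 N) 2 = (((max 0 N).toNat / 2 : Nat) : Int) := by
  rw [PySem.Int.floordiv_eq_ediv_of_pos (by norm_num : (0 : Int) < 2)]
  omega

-- ===== VERDICT (by name: the statement is the Claim_ definition above) =====
theorem calculer_somme_et_produit_pairs_spec : Claim_equal_calculer_somme_et_produit_pairs := by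
  intro N _
  unfold Spec_calculer_somme_et_produit_pairs calculer_somme_et_produit_pairs calculer_somme_et_produit_pairs_alt
  dsimp only
  set K := (max 0 N).toNat / 2 with hK
  rw [pv_evens_list, pv_foldl_triple, pv_floordiv_max, ← hK]
  refine Prod.ext ?_ (Prod.ext ?_ ?_)
  · dsimp only
    simpa using pv_sum_evens K
  · dsimp only
    have hf := pv_fact_range K
    simp only [Int.toNat_natCast]
    rw [hf] at *
    simpa [hf] using pv_prod_evens K
  · dsimp only
    rw [PySem.List.pyRange_one]
    have h1 : ((K : Int) + 1 - 1).toNat = K := by omega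
    rw [h1, List.map_map]
    unfold pvEvens
    refine (List.map_congr_left ?_).symm
    intro j _
    simp; ring
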